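-- pv_equiv track=rewrite | github.com/GEODE-Lab/DeciduousFraction | samples/test_geom_extraction.py | find_search_string
-- ===== SOURCE A (Python) =====
-- def find_search_string(year):
--     """
--     Method to return the appropriate string to search for in the tile name
--     based on the year of sample
--     :param year: Year of sample
--     :return: string or None
--     """
--     str_dict = {
--         '_1992-': (1987, 1997),
--         '_2000-': (1998, 2002),
--         '_2005-': (2003, 2007),
--         '_2010-': (2008, 2012),
--         '_2015-': (2013, 2018)
--     }
--
--     for k, v in str_dict.items():
--         if v[0] <= year <= v[1]:
--             return k
--     return
-- ===== SOURCE B (Python) =====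
-- def find_search_string(year):
--     """Closed-form bucket arithmetic instead of scanning a dict of ranges."""
--     if 1987 <= year <= 1997:
--         return '_1992-'
--     if 1998 <= year <= 2018:
--         idx = min((year - 1998) // 5, 3)
--         return '_{}-'.format(2000 + 5 * idx)
--     return None
-- ===== Notes on version B (the rewrite author's own statement) =====
-- stated objective: alternative
-- what changed: Replaced the linear scan over a dict of (lo,hi) ranges with closed-form arithmetic: the first bucket is a direct range test and the later equal-width buckets are selected by integer division, with the key string built from the computed base year.
import Mathlib
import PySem

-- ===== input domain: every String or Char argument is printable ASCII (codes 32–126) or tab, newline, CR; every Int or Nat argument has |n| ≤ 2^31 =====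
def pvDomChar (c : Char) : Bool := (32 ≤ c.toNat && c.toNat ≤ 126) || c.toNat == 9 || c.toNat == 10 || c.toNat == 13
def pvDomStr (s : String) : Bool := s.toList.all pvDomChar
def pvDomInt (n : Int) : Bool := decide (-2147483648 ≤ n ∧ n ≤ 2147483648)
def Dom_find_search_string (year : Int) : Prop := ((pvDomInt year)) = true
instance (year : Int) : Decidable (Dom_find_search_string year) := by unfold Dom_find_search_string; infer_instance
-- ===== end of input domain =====

-- B replaces A's linear scan of a dict of ranges by closed-form bucket arithmetic (alternative decomposition, same return value).

-- ===== PORT A =====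
-- the loop 'for k, v in str_dict.items(): if v[0] <= year <= v[1]: return k'
def pvLoopA : List (String × (Int × Int)) → Int → Option String
  | [], _ => none
  | (k, v) :: rest, year => if v.1 ≤ year ∧ year ≤ v.2 then some k else pvLoopA rest year

def find_search_string (year : Int) : Option String :=
  let str_dict : List (String × (Int × Int)) :=
    [("_1992-", (1987, 1997)),
     ("_2000-", (1998, 2002)),
     ("_2005-", (2003, 2007)),
     ("_2010-", (2008, 2012)),
     ("_2015-", (2013, 2018))]
  pvLoopA str_dict year

-- ===== PORT B =====
def find_search_string_alt (year : Int) : Option String :=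
  if 1987 ≤ year ∧ year ≤ 1997 then some "_1992-"
  else if 1998 ≤ year ∧ year ≤ 2018 then
    let idx : Int := min (PySem.Int.floordiv (year - 1998) 5) 3
    some ("_" ++ PySem.Int.toStr (2000 + 5 * idx) ++ "-")
  else none

-- ===== PRECONDITION & SPEC =====
def Spec_find_search_string (year : Int) (out : Option String) : Prop := out = find_search_string_alt year
instance (year : Int) (out : Option String) : Decidable (Spec_find_search_string year out) := by unfold Spec_find_search_string; infer_instance

-- ===== CLAIM (what is proved, stated in full; the proofs are below) =====
def Claim_equal_find_search_string : Prop := ∀ (year : Int), Dom_find_search_string year → Spec_find_search_string year (find_search_string year)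

-- ===== LEMMAS AND PROOFS =====

-- ===== VERDICT (by name: the statement is the Claim_ definition above) =====
theorem find_search_string_spec : Claim_equal_find_search_string := by
  intro year _
  unfold Spec_find_search_string
  by_cases h : 1987 ≤ year ∧ year ≤ 2018
  · obtain ⟨h1, h2⟩ := h
    interval_cases year <;> decide
  · simp only [find_search_string, find_search_string_alt, pvLoopA]
    split_ifs <;> first | rfl | omega
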